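-- pv_equiv track=rewrite | github.com/aissataikyzy/pp3 | end/12.py | multiply_transpose_by_matrix
-- ===== SOURCE A (Python) =====
-- def transpose_matrix(matrix):
--     rows, cols = len(matrix), len(matrix[0])
--     transposed_matrix = [[matrix[j][i] for j in range(rows)] for i in range(cols)]
--     return transposed_matrix
--
-- def multiply_transpose_by_matrix(matrix):
--     rows, cols = len(matrix), len(matrix[0])
--     transposed_matrix = transpose_matrix(matrix)
--     result_matrix = [[0] * cols for _ in range(cols)]
--
--     for i in range(cols):
--         for j in range(cols):
--             result_matrix[i][j] = sum(transposed_matrix[i][k] * matrix[k][j] for k in range(rows))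
--
--     return result_matrix
-- ===== SOURCE B (Python) =====
-- def multiply_transpose_by_matrix(matrix):
--     # One pass over the rows: add each row's outer-product contribution
--     # into the accumulator, instead of transposing and doing triple-nested sums.
--     cols = len(matrix[0])
--     result = [[0] * cols for _ in range(cols)]
--     for row in matrix:
--         for i in range(cols):
--             ri = result[i]
--             vi = row[i]
--             for j in range(cols):
--                 ri[j] += vi * row[j]
--     return result
-- ===== Notes on version B (the rewrite author's own statement) =====
-- stated objective: alternative
-- what changed: Drops the transpose helper and the per-entry sum over k: B makes one pass over the matrix rows, accumulating each row's outer product row[i]*row[j] into the result.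
import Mathlib
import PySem

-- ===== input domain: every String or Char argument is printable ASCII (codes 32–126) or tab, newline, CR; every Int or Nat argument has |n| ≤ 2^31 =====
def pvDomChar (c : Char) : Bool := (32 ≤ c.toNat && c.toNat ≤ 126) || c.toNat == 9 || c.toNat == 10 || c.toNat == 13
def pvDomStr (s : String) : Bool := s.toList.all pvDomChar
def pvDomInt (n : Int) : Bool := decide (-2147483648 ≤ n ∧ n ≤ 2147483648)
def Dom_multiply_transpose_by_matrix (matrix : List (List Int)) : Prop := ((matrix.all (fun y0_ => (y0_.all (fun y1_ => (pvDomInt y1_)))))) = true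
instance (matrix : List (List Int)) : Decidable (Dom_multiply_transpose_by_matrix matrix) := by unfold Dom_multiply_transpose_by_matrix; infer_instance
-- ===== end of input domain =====

-- B drops the transpose helper and the per-entry k-sums: it accumulates each row's
-- outer product into the result in one pass over the rows (alternative decomposition, same cost).

-- ===== PORT A =====
-- helper transpose_matrix, inlined-shape transliteration of A's code;
-- pyGetD is exact wherever the Python indexing does not raise (Pre_ below).
def transpose_matrix (matrix : List (List Int)) : List (List Int) :=
  let rows := matrix.length
  let cols := (PySem.List.pyGetD matrix 0 []).length
  (List.range cols).map (fun (i : Nat) =>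
    (List.range rows).map (fun (j : Nat) =>
      PySem.List.pyGetD (PySem.List.pyGetD matrix (j : Int) []) (i : Int) 0))

def multiply_transpose_by_matrix (matrix : List (List Int)) : List (List Int) :=
  let rows := matrix.length
  let cols := (PySem.List.pyGetD matrix 0 []).length
  let transposed := transpose_matrix matrix
  (List.range cols).map (fun (i : Nat) =>
    (List.range cols).map (fun (j : Nat) =>
      ((List.range rows).map (fun (k : Nat) =>
        PySem.List.pyGetD (PySem.List.pyGetD transposed (i : Int) []) (k : Int) 0 *
        PySem.List.pyGetD (PySem.List.pyGetD matrix (k : Int) []) (j : Int) 0)).sum))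

-- ===== PORT B =====
-- fold over the rows; the in-place `ri[j] += vi*row[j]` double loop over result
-- becomes the indexed rebuild of the accumulator (mapIdx).
def multiply_transpose_by_matrix_alt (matrix : List (List Int)) : List (List Int) :=
  let cols := (PySem.List.pyGetD matrix 0 []).length
  let init := (List.range cols).map (fun _ => List.replicate cols (0 : Int))
  matrix.foldl (fun res row =>
    res.mapIdx (fun i ri =>
      ri.mapIdx (fun j v =>
        v + PySem.List.pyGetD row (i : Int) 0 * PySem.List.pyGetD row (j : Int) 0))) init

-- ===== PRECONDITION & SPEC =====
-- Pre_ excludes exactly the inputs on which the Python A raises IndexError: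
-- the empty matrix (len(matrix[0])) and matrices with a row shorter than the first row.
def Pre_multiply_transpose_by_matrix (matrix : List (List Int)) : Prop :=
  matrix ≠ [] ∧ ∀ row ∈ matrix, (matrix.getD 0 []).length ≤ row.length
instance (matrix : List (List Int)) : Decidable (Pre_multiply_transpose_by_matrix matrix) := by
  unfold Pre_multiply_transpose_by_matrix; infer_instance

def pvWitness_multiply_transpose_by_matrix : List (List Int) := [[1, 2], [3, 4]]

def Spec_multiply_transpose_by_matrix (matrix : List (List Int)) (out : List (List Int)) : Prop := out = multiply_transpose_by_matrix_alt matrix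
instance (matrix : List (List Int)) (out : List (List Int)) : Decidable (Spec_multiply_transpose_by_matrix matrix out) := by unfold Spec_multiply_transpose_by_matrix; infer_instance

-- ===== CLAIM (what is proved, stated in full; the proofs are below) =====
def Claim_equal_multiply_transpose_by_matrix : Prop := ∀ (matrix : List (List Int)), Dom_multiply_transpose_by_matrix matrix → Pre_multiply_transpose_by_matrix matrix → Spec_multiply_transpose_by_matrix matrix (multiply_transpose_by_matrix matrix)

-- ===== LEMMAS AND PROOFS =====

-- mapIdx over a map of a range rewrites pointwise
theorem pv_mapIdx_map_range {α β : Type} (n : Nat) (f : Nat → α) (h : Nat → α → β) :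
    ((List.range n).map f).mapIdx h = (List.range n).map (fun i => h i (f i)) := by
  apply List.ext_getElem
  · simp [List.length_mapIdx]
  · intro k h1 h2
    simp [List.getElem_mapIdx]

-- indexing a map of a range
theorem pv_getD_map_range {α : Type} (n k : Nat) (f : Nat → α) (d : α) (hk : k < n) :
    ((List.range n).map f).getD k d = f k := by
  rw [List.getD_eq_getElem _ _ (by simpa using hk)]
  simp

-- a range-indexed map over getD is just a map over the list
theorem pv_map_range_getD {α β : Type} (l : List α) (f : α → β) (d : α) :
    (List.range l.length).map (fun k => f (l.getD k d)) = l.map f := by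
  apply List.ext_getElem
  · simp
  · intro k h1 h2
    have hk : k < l.length := by simpa using h2
    simp [List.getElem?_eq_getElem hk]

-- the fold of B's row-update step, characterised entrywise
theorem pv_fold_char (cols : Nat) (l : List (List Int)) (g : Nat → Nat → Int) :
    l.foldl (fun res row =>
      res.mapIdx (fun i ri =>
        ri.mapIdx (fun j v => v + row.getD i 0 * row.getD j 0)))
      ((List.range cols).map (fun i => (List.range cols).map (fun j => g i j)))
    = (List.range cols).map (fun i => (List.range cols).map (fun j =>
        l.foldl (fun a r => a + r.getD i 0 * r.getD j 0) (g i j))) := by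
  induction l generalizing g with
  | nil => simp
  | cons r t ih =>
      simp only [List.foldl_cons]
      rw [pv_mapIdx_map_range]
      have hrow : ∀ i : Nat,
          ((List.range cols).map (fun j => g i j)).mapIdx
            (fun j v => v + r.getD i 0 * r.getD j 0)
          = (List.range cols).map (fun j => g i j + r.getD i 0 * r.getD j 0) := by
        intro i; rw [pv_mapIdx_map_range]
      simp only [hrow]
      exact ih (fun i j => g i j + r.getD i 0 * r.getD j 0)

-- ===== VERDICT (by name: the statement is the Claim_ definition above) =====
theorem multiply_transpose_by_matrix_spec : Claim_equal_multiply_transpose_by_matrix := by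
  intro matrix _ _
  unfold Spec_multiply_transpose_by_matrix
  unfold multiply_transpose_by_matrix multiply_transpose_by_matrix_alt transpose_matrix
  simp only [PySem.List.pyGetD_natCast, PySem.List.pyGetD_zero]
  -- rewrite B's init as a map of a double range, then apply the fold characterisation
  have hinit : (List.range (matrix.getD 0 []).length).map
      (fun _ => List.replicate (matrix.getD 0 []).length (0 : Int))
      = (List.range (matrix.getD 0 []).length).map
        (fun i => (List.range (matrix.getD 0 []).length).map
          (fun j => (fun (_ _ : Nat) => (0 : Int)) i j)) := by
    apply List.map_congr_left
    intro i _
    simp [List.map_const']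
  rw [hinit, pv_fold_char (matrix.getD 0 []).length matrix (fun _ _ => 0)]
  apply List.map_congr_left
  intro i hi
  apply List.map_congr_left
  intro j hj
  simp only [List.mem_range] at hi hj
  calc ((List.range matrix.length).map (fun k =>
        (((List.range (matrix.getD 0 []).length).map (fun i' =>
          (List.range matrix.length).map (fun j' => (matrix.getD j' []).getD i' 0))).getD i []).getD k 0 *
        (matrix.getD k []).getD j 0)).sum
      = ((List.range matrix.length).map (fun k =>
          (matrix.getD k []).getD i 0 * (matrix.getD k []).getD j 0)).sum := by
        congr 1
        apply List.map_congr_left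
        intro k hk
        rw [pv_getD_map_range _ _ _ _ hi, pv_getD_map_range _ _ _ _ (List.mem_range.mp hk)]
    _ = (matrix.map (fun r => r.getD i 0 * r.getD j 0)).sum := by
        rw [pv_map_range_getD matrix (fun r => r.getD i 0 * r.getD j 0) []]
    _ = matrix.foldl (fun a r => a + r.getD i 0 * r.getD j 0) 0 := by
        rw [List.sum_eq_foldl, List.foldl_map]
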